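-- pv_equiv track=rewrite | github.com/potassco/benchmark-tool | src/benchmarktool/result/xlsx_gen.py | get_cell_index
-- ===== SOURCE A (Python) =====
-- def get_cell_index(col: int, row: int, abs_col: bool = False, abs_row: bool = False) -> str:
--     """
--     Calculate spreadsheet cell index.
--
--     Attributes:
--         col (int):      Column index.
--         row (int):      Row index.
--         abs_col (bool): Set '$' for column.
--         abs_row (bool): Set '$' for row.
--     """
--     radix = ord("Z") - ord("A") + 1
--     ret = ""
--     while col >= 0:
--         rem = col % radix
--         ret = chr(rem + ord("A")) + ret
--         col = col // radix - 1
--     pre_col = "$" if abs_col else ""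
--     pre_row = "$" if abs_row else ""
--     return f"{pre_col}{ret}{pre_row}{row + 1}"
-- ===== SOURCE B (Python) =====
-- def get_cell_index(col: int, row: int, abs_col: bool = False, abs_row: bool = False) -> str:
--     """Block-arithmetic reimplementation: locate the letter-count block, then
--     emit the column letters left to right by fixed-width base-26 division."""
--     letters = ""
--     if col >= 0:
--         start, span = 0, 26
--         while col >= start + span:
--             start, span = start + span, span * 26
--         x, p = col - start, span // 26
--         while p > 0:
--             letters += chr(ord("A") + x // p)
--             x, p = x % p, p // 26
--     pre_col = "$" if abs_col else ""
--     pre_row = "$" if abs_row else ""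
--     return f"{pre_col}{letters}{pre_row}{row + 1}"
-- ===== Notes on version B (the rewrite author's own statement) =====
-- stated objective: alternative
-- what changed: Replaces A's right-to-left prepend loop (repeated col//26-1 divmod) by a two-phase block algorithm: first find the letter-width block by accumulating powers of 26, then emit the letters left to right by fixed-width base-26 division; '$' and row formatting unchanged.
import Mathlib
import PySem

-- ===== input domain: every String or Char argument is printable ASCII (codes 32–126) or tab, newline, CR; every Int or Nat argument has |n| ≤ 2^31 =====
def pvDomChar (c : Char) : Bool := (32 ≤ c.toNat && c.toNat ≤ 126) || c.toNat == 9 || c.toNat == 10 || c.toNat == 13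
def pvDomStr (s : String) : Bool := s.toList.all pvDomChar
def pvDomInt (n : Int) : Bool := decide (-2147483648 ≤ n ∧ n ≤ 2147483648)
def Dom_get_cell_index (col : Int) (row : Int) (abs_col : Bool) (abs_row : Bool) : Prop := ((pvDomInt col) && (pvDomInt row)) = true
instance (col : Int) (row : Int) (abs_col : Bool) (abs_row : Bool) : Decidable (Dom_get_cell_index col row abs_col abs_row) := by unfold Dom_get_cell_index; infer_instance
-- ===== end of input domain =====

-- B replaces A's right-to-left prepend loop by a two-phase block algorithm (find the
-- letter-width block, then emit letters left to right by fixed-width base-26 division);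
-- same '$' and row formatting. Objective: alternative algorithm, same cost.

-- ===== PORT A =====
-- A's while loop: 'while col >= 0: ret = chr(col % 26 + ord("A")) + ret; col = col // 26 - 1'.
-- The Nat fuel is only a totality guard: (col+2).toNat iterations always suffice, since
-- col strictly decreases each step (col // 26 - 1 ≤ col - 1 for col ≥ 0).
def pvLoopA (fuel : Nat) (col : Int) (ret : String) : String :=
  match fuel with
  | 0 => ret
  | fuel + 1 =>
    if col ≥ 0 then
      pvLoopA fuel (PySem.Int.floordiv col 26 - 1)
        (String.ofList [Char.ofNat ((PySem.Int.mod col 26).toNat + 65)] ++ ret)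
    else ret

def get_cell_index (col : Int) (row : Int) (abs_col : Bool) (abs_row : Bool) : String :=
  (if abs_col then "$" else "") ++ pvLoopA (col + 2).toNat col ""
    ++ (if abs_row then "$" else "") ++ PySem.Int.toStr (row + 1)

-- ===== PORT B =====
-- B phase 1: 'while col >= start + span: start, span = start + span, span * 26'.
-- Fuel (col+2).toNat is a totality guard only: span grows 26-fold each step.
def pvFindBlock (fuel : Nat) (col start span : Int) : Int × Int :=
  match fuel with
  | 0 => (start, span)
  | fuel + 1 =>
    if col ≥ start + span then pvFindBlock fuel col (start + span) (span * 26)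
    else (start, span)

-- B phase 2: 'while p > 0: letters += chr(ord("A") + x // p); x, p = x % p, p // 26'.
-- Fuel (p+1).toNat is a totality guard only: p shrinks 26-fold each step.
def pvEmit (fuel : Nat) (x p : Int) (letters : String) : String :=
  match fuel with
  | 0 => letters
  | fuel + 1 =>
    if p > 0 then
      pvEmit fuel (PySem.Int.mod x p) (PySem.Int.floordiv p 26)
        (letters ++ String.ofList [Char.ofNat (65 + (PySem.Int.floordiv x p).toNat)])
    else letters

def get_cell_index_alt (col : Int) (row : Int) (abs_col : Bool) (abs_row : Bool) : String :=
  let letters :=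
    if col ≥ 0 then
      let sb := pvFindBlock (col + 2).toNat col 0 26
      pvEmit (PySem.Int.floordiv sb.2 26 + 1).toNat (col - sb.1) (PySem.Int.floordiv sb.2 26) ""
    else ""
  (if abs_col then "$" else "") ++ letters
    ++ (if abs_row then "$" else "") ++ PySem.Int.toStr (row + 1)

-- ===== PRECONDITION & SPEC =====
def Spec_get_cell_index (col : Int) (row : Int) (abs_col : Bool) (abs_row : Bool) (out : String) : Prop := out = get_cell_index_alt col row abs_col abs_row
instance (col : Int) (row : Int) (abs_col : Bool) (abs_row : Bool) (out : String) : Decidable (Spec_get_cell_index col row abs_col abs_row out) := by unfold Spec_get_cell_index; infer_instance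

-- ===== CLAIM (what is proved, stated in full; the proofs are below) =====
def Claim_equal_get_cell_index : Prop := ∀ (col : Int) (row : Int) (abs_col : Bool) (abs_row : Bool), Dom_get_cell_index col row abs_col abs_row → Spec_get_cell_index col row abs_col abs_row (get_cell_index col row abs_col abs_row)

-- ===== LEMMAS AND PROOFS =====

-- one column letter, code r + ord('A')
def pvCh (r : Int) : String := String.ofList [Char.ofNat (r.toNat + 65)]

-- the column-letter string, as the natural recursion both programs compute
def pvLetters (c : Int) : String :=
  if h : c < 0 then "" else pvLetters (c / 26 - 1) ++ pvCh (c % 26)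
termination_by (c + 1).toNat
decreasing_by
  have h1 : c / 26 ≤ c := Int.ediv_le_self 26 (by omega)
  omega

-- w+1 base-26 digits of x, low digit appended last
def pvDlow : Nat → Int → String
  | 0, x => pvCh (x % 26)
  | w + 1, x => pvDlow w (x / 26) ++ pvCh (x % 26)

-- start of the block of (w+1)-letter columns: 0, 26, 702, …
def pvS : Nat → Int
  | 0 => 0
  | k + 1 => 26 * (pvS k + 1)

theorem pvS_nonneg (k : Nat) : 0 ≤ pvS k := by
  induction k with
  | zero => simp [pvS]
  | succ k ih => simp only [pvS]; omega

theorem pvS_succ (k : Nat) : pvS (k + 1) = pvS k + 26 ^ (k + 1) := by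
  induction k with
  | zero => simp [pvS]
  | succ k ih =>
    calc pvS (k + 2) = 26 * (pvS (k + 1) + 1) := rfl
      _ = 26 * (pvS k + 26 ^ (k + 1) + 1) := by rw [ih]
      _ = 26 * (pvS k + 1) + 26 ^ (k + 2) := by ring
      _ = pvS (k + 1) + 26 ^ (k + 2) := rfl

theorem pvLetters_neg (c : Int) (h : c < 0) : pvLetters c = "" := by
  rw [pvLetters]; simp [h]

theorem pvLoopA_eq (f : Nat) : ∀ (c : Int) (ret : String), (c + 2).toNat ≤ f →
    pvLoopA f c ret = pvLetters c ++ ret := by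
  induction f with
  | zero =>
    intro c ret h
    have hc : c < 0 := by omega
    simp [pvLoopA, pvLetters_neg c hc]
  | succ f ih =>
    intro c ret h
    by_cases hc : c ≥ 0
    · rw [pvLoopA, if_pos hc,
        PySem.Int.floordiv_eq_ediv_of_pos (by norm_num : (0:Int) < 26),
        PySem.Int.mod_eq_emod_of_pos (by norm_num : (0:Int) < 26)]
      have hle : c / 26 ≤ c := Int.ediv_le_self 26 hc
      rw [ih (c / 26 - 1) _ (by omega)]
      conv_rhs => rw [pvLetters]
      rw [dif_neg (by omega : ¬ c < 0)]
      simp [pvCh, String.append_assoc]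
    · rw [pvLoopA, if_neg hc, pvLetters_neg c (by omega)]
      simp

-- n < 26 ^ n
theorem pvPowBigN (n : Nat) : n < 26 ^ n := Nat.lt_pow_self (by norm_num)

-- the three digit identities, lifted from Nat
theorem pvDigits (w : Nat) (x : Int) (hx : 0 ≤ x) :
    (x / 26) / 26 ^ w = x / 26 ^ (w + 1) ∧
    (x / 26) % 26 ^ w = (x % 26 ^ (w + 1)) / 26 ∧
    (x % 26 ^ (w + 1)) % 26 = x % 26 := by
  obtain ⟨m, rfl⟩ := Int.eq_ofNat_of_zero_le hx
  have hp : ((26:Int) ^ w) = ((26 ^ w : Nat) : Int) := by push_cast; ring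
  have hp1 : ((26:Int) ^ (w + 1)) = ((26 ^ (w + 1) : Nat) : Int) := by push_cast; ring
  have h26 : ((26:Int)) = ((26 : Nat) : Int) := by norm_num
  refine ⟨?_, ?_, ?_⟩
  · rw [hp, hp1, h26, ← Int.natCast_ediv, ← Int.natCast_ediv, ← Int.natCast_ediv]
    norm_cast
    rw [Nat.div_div_eq_div_mul, ← pow_succ']
  · rw [hp, hp1, h26, ← Int.natCast_ediv, ← Int.natCast_emod, ← Int.natCast_emod, ← Int.natCast_ediv]
    norm_cast
    rw [pow_succ', Nat.mod_mul_right_div_self]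
  · rw [hp1, h26, ← Int.natCast_emod, ← Int.natCast_emod, ← Int.natCast_emod]
    norm_cast
    exact Nat.mod_mod_of_dvd m (dvd_pow_self 26 (Nat.succ_ne_zero w))

-- high/low digit split: the leading digit of w+2 digits, then the rest
theorem pvDlow_high (w : Nat) : ∀ (x : Int), 0 ≤ x → x < 26 ^ (w + 2) →
    pvDlow (w + 1) x = pvCh (x / 26 ^ (w + 1)) ++ pvDlow w (x % 26 ^ (w + 1)) := by
  induction w with
  | zero =>
    intro x hx hb
    have hb' : x < 676 := by norm_num at hb; omega
    have h1 : x / 26 % 26 = x / 26 := by omega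
    have h2 : x % 26 % 26 = x % 26 := by omega
    simp [pvDlow, pow_one, h1, h2]
  | succ w ih =>
    intro x hx hb
    obtain ⟨hd, hm, hl⟩ := pvDigits (w + 1) x hx
    have hx26 : (0:Int) ≤ x / 26 := Int.ediv_nonneg hx (by norm_num)
    have hb26 : x / 26 < 26 ^ (w + 2) := by
      rw [Int.ediv_lt_iff_lt_mul (by norm_num : (0:Int) < 26)]
      calc x < 26 ^ (w + 3) := hb
        _ = 26 ^ (w + 2) * 26 := by rw [pow_succ]
    have : pvDlow (w + 2) x = pvDlow (w + 1) (x / 26) ++ pvCh (x % 26) := rfl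
    rw [this, ih (x / 26) hx26 hb26, hd, hm, ← hl]
    have : pvDlow (w + 1) (x % 26 ^ (w + 2)) =
        pvDlow w ((x % 26 ^ (w + 2)) / 26) ++ pvCh ((x % 26 ^ (w + 2)) % 26) := rfl
    rw [this, String.append_assoc]

-- the block recursion computes the letters: pvLetters (pvS w + x) = digits of x
theorem pvLetters_block (w : Nat) : ∀ (x : Int), 0 ≤ x → x < 26 ^ (w + 1) →
    pvLetters (pvS w + x) = pvDlow w x := by
  induction w with
  | zero =>
    intro x hx hb
    have hb' : x < 26 := by norm_num at hb; omega
    rw [show pvS 0 + x = x by simp [pvS], pvLetters, dif_neg (by omega : ¬ x < 0),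
      pvLetters_neg (x / 26 - 1) (by omega)]
    simp [pvDlow]
  | succ w ih =>
    intro x hx hb
    have hS : 0 ≤ pvS w := pvS_nonneg w
    have hc : pvS (w + 1) + x = 26 * (pvS w + 1) + x := rfl
    have hdiv : (26 * (pvS w + 1) + x) / 26 - 1 = pvS w + x / 26 := by omega
    have hmod : (26 * (pvS w + 1) + x) % 26 = x % 26 := by omega
    have hx26 : (0:Int) ≤ x / 26 := Int.ediv_nonneg hx (by norm_num)
    have hb26 : x / 26 < 26 ^ (w + 1) := by
      rw [Int.ediv_lt_iff_lt_mul (by norm_num : (0:Int) < 26)]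
      calc x < 26 ^ (w + 2) := hb
        _ = 26 ^ (w + 1) * 26 := by rw [pow_succ]
    rw [hc, pvLetters, dif_neg (by omega : ¬ 26 * (pvS w + 1) + x < 0), hdiv, hmod,
      ih (x / 26) hx26 hb26]
    rfl

-- phase 2 emits exactly the w+1 digits of x (left to right), given p = 26^w
theorem pvEmit_eq (w : Nat) : ∀ (f : Nat) (x : Int) (acc : String), 0 ≤ x → x < 26 ^ (w + 1) →
    w + 2 ≤ f → pvEmit f x (26 ^ w) acc = acc ++ pvDlow w x := by
  induction w with
  | zero =>
    intro f x acc hx hb hf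
    obtain ⟨g, rfl⟩ : ∃ g, f = g + 2 := ⟨f - 2, by omega⟩
    have hb' : x < 26 := by norm_num at hb; omega
    rw [pvEmit, pow_zero, if_pos (by norm_num),
      PySem.Int.floordiv_eq_ediv_of_pos (by norm_num : (0:Int) < 1),
      PySem.Int.mod_eq_emod_of_pos (by norm_num : (0:Int) < 1),
      PySem.Int.floordiv_eq_ediv_of_pos (by norm_num : (0:Int) < 26)]
    rw [show x / 1 = x from Int.ediv_one x, show x % 1 = 0 from Int.emod_one x,
      show (1:Int) / 26 = 0 by norm_num]
    rw [pvEmit, if_neg (by norm_num)]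
    have : x % 26 = x := by omega
    simp [pvDlow, pvCh, this, Nat.add_comm]
  | succ w ih =>
    intro f x acc hx hb hf
    obtain ⟨g, rfl⟩ : ∃ g, f = g + 1 := ⟨f - 1, by omega⟩
    have hp : (0:Int) < 26 ^ (w + 1) := pow_pos (by norm_num) _
    rw [pvEmit, if_pos (by omega),
      PySem.Int.floordiv_eq_ediv_of_pos (by norm_num : (0:Int) < 26),
      PySem.Int.mod_eq_emod_of_pos hp,
      PySem.Int.floordiv_eq_ediv_of_pos hp]
    rw [show (26:Int) ^ (w + 1) / 26 = 26 ^ w by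
      rw [pow_succ]; exact Int.mul_ediv_cancel _ (by norm_num)]
    rw [ih g (x % 26 ^ (w + 1)) _ (Int.emod_nonneg x (by positivity)) (Int.emod_lt_of_pos x hp)
      (by omega)]
    rw [pvDlow_high w x hx hb]
    simp [pvCh, String.append_assoc, Nat.add_comm]

-- phase 1 lands on the block of col: the returned (start, span) are (pvS w, 26^(w+1))
theorem pvFindBlock_eq (f : Nat) : ∀ (k : Nat) (col : Int), pvS k ≤ col →
    col < pvS k + 26 ^ (k + 1) * 26 ^ f →
    ∃ w : Nat, pvFindBlock f col (pvS k) (26 ^ (k + 1)) = (pvS w, 26 ^ (w + 1)) ∧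
      pvS w ≤ col ∧ col < pvS w + 26 ^ (w + 1) := by
  induction f with
  | zero =>
    intro k col hle hlt
    exact ⟨k, rfl, hle, by simpa using hlt⟩
  | succ f ih =>
    intro k col hle hlt
    rw [pvFindBlock]
    by_cases h : col ≥ pvS k + 26 ^ (k + 1)
    · rw [if_pos h]
      have hs : pvS k + 26 ^ (k + 1) = pvS (k + 1) := (pvS_succ k).symm
      have hsp : (26:Int) ^ (k + 1) * 26 = 26 ^ (k + 2) := by rw [← pow_succ]
      rw [hs, hsp]
      refine ih (k + 1) col (by linarith [pvS_succ k]) ?_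
      have hkey : pvS k + 26 ^ (k + 1) * 26 ^ (f + 1) ≤ pvS (k + 1) + 26 ^ (k + 2) * 26 ^ f := by
        have h1 : (26:Int) ^ (k + 2) * 26 ^ f = 26 ^ (k + 1) * 26 ^ (f + 1) := by ring
        have h2 : (0:Int) < 26 ^ (k + 1) := by positivity
        rw [h1, pvS_succ k]
        linarith
      exact lt_of_lt_of_le hlt hkey
    · rw [if_neg h]
      exact ⟨k, rfl, hle, by omega⟩

-- col itself is below its fuel-reachable span
theorem pvColBound (col : Int) (hc : 0 ≤ col) :
    col < pvS 0 + 26 ^ (0 + 1) * 26 ^ (col + 2).toNat := by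
  have h1 : ((col + 2).toNat : Int) < 26 ^ (col + 2).toNat := by
    have := pvPowBigN (col + 2).toNat
    exact_mod_cast this
  have h2 : (0:Int) < 26 ^ (col + 2).toNat := by positivity
  simp only [pvS, zero_add, pow_one]
  omega

-- B's letters equal pvLetters col, for col ≥ 0
theorem pvAltLetters (col : Int) (hc : 0 ≤ col) :
    (let sb := pvFindBlock (col + 2).toNat col 0 26
     pvEmit (PySem.Int.floordiv sb.2 26 + 1).toNat (col - sb.1) (PySem.Int.floordiv sb.2 26) "")
    = pvLetters col := by
  obtain ⟨w, heq, hle, hlt⟩ := pvFindBlock_eq (col + 2).toNat 0 col (by simpa [pvS] using hc)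
    (pvColBound col hc)
  rw [show pvS 0 = (0:Int) from rfl] at heq
  norm_num at heq
  simp only [heq]
  rw [PySem.Int.floordiv_eq_ediv_of_pos (by norm_num : (0:Int) < 26)]
  rw [show (26:Int) ^ (w + 1) / 26 = 26 ^ w by
    rw [pow_succ]; exact Int.mul_ediv_cancel _ (by norm_num)]
  have hft : ((26:Int) ^ w + 1).toNat = 26 ^ w + 1 := by
    have : ((26:Int) ^ w + 1) = ((26 ^ w + 1 : Nat) : Int) := by push_cast; ring
    rw [this, Int.toNat_natCast]
  rw [hft]
  have hx0 : (0:Int) ≤ col - pvS w := by omega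
  have hx1 : col - pvS w < 26 ^ (w + 1) := by omega
  rw [pvEmit_eq w (26 ^ w + 1) (col - pvS w) "" hx0 hx1 (by have := pvPowBigN w; omega)]
  have hblk := pvLetters_block w (col - pvS w) hx0 hx1
  rw [show pvS w + (col - pvS w) = col by ring] at hblk
  rw [← hblk]
  simp

-- ===== VERDICT (by name: the statement is the Claim_ definition above) =====
theorem get_cell_index_spec : Claim_equal_get_cell_index := by
  intro col row abs_col abs_row _
  unfold Spec_get_cell_index get_cell_index get_cell_index_alt
  by_cases hc : 0 ≤ col
  · rw [pvLoopA_eq (col + 2).toNat col "" le_rfl]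
    simp only [if_pos (by omega : col ≥ 0)]
    rw [pvAltLetters col hc]
    simp
  · rw [pvLoopA_eq (col + 2).toNat col "" le_rfl, pvLetters_neg col (by omega)]
    simp [if_neg (by omega : ¬ col ≥ 0)]
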